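-- pv_equiv track=rewrite | github.com/pfuentea/python_bucles | for_loop_basic1.py | count_flex
-- ===== SOURCE A (Python) =====
-- def count_flex(lowNum, highNum, mult):
--     init= lowNum
--     end=highNum
--     result=""
--     while init <= end:
--         if(init%3==0):
--             result+=str(init)+","
--         init+=1
--     return result[0:len(result)-1]
-- ===== SOURCE B (Python) =====
-- def count_flex(lowNum, highNum, mult):
--     start = -(-lowNum // 3) * 3
--     return ",".join(str(n) for n in range(start, highNum + 1, 3))
-- ===== Notes on version B (the rewrite author's own statement) =====
-- stated objective: faster
-- what changed: B jumps directly to the first multiple of 3 >= lowNum with ceiling division and iterates only over the multiples with range(start, highNum+1, 3), joining their string forms with ','.join, instead of scanning every integer with a per-element modulo test and trimming a trailing comma.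
import Mathlib
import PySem

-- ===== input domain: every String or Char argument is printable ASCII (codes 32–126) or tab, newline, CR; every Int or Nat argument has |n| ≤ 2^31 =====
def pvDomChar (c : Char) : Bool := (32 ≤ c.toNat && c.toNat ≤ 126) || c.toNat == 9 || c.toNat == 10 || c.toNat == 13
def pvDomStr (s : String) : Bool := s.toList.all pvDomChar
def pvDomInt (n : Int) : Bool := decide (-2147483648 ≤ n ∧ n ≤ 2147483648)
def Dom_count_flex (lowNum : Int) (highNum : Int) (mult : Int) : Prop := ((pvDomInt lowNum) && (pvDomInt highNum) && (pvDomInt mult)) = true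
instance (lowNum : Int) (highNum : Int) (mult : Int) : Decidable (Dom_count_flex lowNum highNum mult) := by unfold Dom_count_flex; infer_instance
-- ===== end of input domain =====

-- B skips the integer-by-integer scan: it starts at the first multiple of 3 ≥ lowNum
-- (ceiling division) and walks only the multiples with a step-3 range, joined by ','.

-- ===== PORT A =====
-- the 'while init <= end' loop of A, accumulating 'result'
def countLoopA (init : Int) (e : Int) (result : String) : String :=
  if init ≤ e then
    countLoopA (init + 1) e
      (if PySem.Int.mod init 3 == 0 then result ++ PySem.Int.toStr init ++ "," else result)
  else result
termination_by (e + 1 - init).toNat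
decreasing_by all_goals omega

def count_flex (lowNum : Int) (highNum : Int) (mult : Int) : String :=
  let result := countLoopA lowNum highNum ""
  PySem.Str.slice result (some 0) (some (PySem.Str.len result - 1))

-- ===== PORT B =====
def count_flex_alt (lowNum : Int) (highNum : Int) (mult : Int) : String :=
  let start := -(PySem.Int.floordiv (-lowNum) 3) * 3
  PySem.Str.join "," ((PySem.List.pyRange start (highNum + 1) 3).map PySem.Int.toStr)

-- ===== PRECONDITION & SPEC =====
def Spec_count_flex (lowNum : Int) (highNum : Int) (mult : Int) (out : String) : Prop := out = count_flex_alt lowNum highNum mult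
instance (lowNum : Int) (highNum : Int) (mult : Int) (out : String) : Decidable (Spec_count_flex lowNum highNum mult out) := by unfold Spec_count_flex; infer_instance

-- ===== CLAIM (what is proved, stated in full; the proofs are below) =====
def Claim_equal_count_flex : Prop := ∀ (lowNum : Int) (highNum : Int) (mult : Int), Dom_count_flex lowNum highNum mult → Spec_count_flex lowNum highNum mult (count_flex lowNum highNum mult)

-- ===== LEMMAS AND PROOFS =====

-- the ascending list of multiples of 3 in [init, e]
def pvMults (init : Int) (e : Int) : List Int :=
  if init ≤ e then
    (if init % 3 = 0 then init :: pvMults (init + 1) e else pvMults (init + 1) e)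
  else []
termination_by (e + 1 - init).toNat
decreasing_by all_goals omega

-- A's loop produces the concatenation of "str(n)," over the multiples
theorem loopA_eq (init e : Int) (acc : String) :
    (countLoopA init e acc).toList =
      acc.toList ++ (pvMults init e).flatMap (fun n => PySem.Int.toChars n ++ [',']) := by
  rw [countLoopA, pvMults]
  by_cases h : init ≤ e
  · simp only [if_pos h]
    rw [loopA_eq (init + 1) e]
    have h3 : PySem.Int.mod init 3 = init % 3 :=
      PySem.Int.mod_eq_emod_of_pos (by norm_num)
    by_cases hz : init % 3 = 0
    · simp [hz, String.toList_append, PySem.Int.toList_toStr]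
    · simp [hz]
  · simp [h]
termination_by (e + 1 - init).toNat
decreasing_by all_goals omega

-- dropping the trailing comma from the concatenation yields the ","-join
theorem join_trim (l : List Int) :
    ((l.flatMap (fun n => PySem.Int.toChars n ++ [','])).dropLast) =
      PySem.Chars.join [','] (l.map PySem.Int.toChars) := by
  match l with
  | [] => simp [PySem.Chars.join_nil]
  | [n] => simp [PySem.Chars.join_singleton]
  | n :: m :: t =>
    rw [List.flatMap_cons,
        List.dropLast_append_of_ne_nil (by simp [List.flatMap_cons]),
        join_trim (m :: t)]
    simp only [List.map_cons, PySem.Chars.join_cons_cons, List.append_assoc]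

-- a positive-step range peels its head
theorem range3_cons (a b : Int) (h : a < b) :
    PySem.List.pyRange a b 3 = a :: PySem.List.pyRange (a + 3) b 3 := by
  rw [PySem.List.pyRange_of_pos a b (by norm_num),
      PySem.List.pyRange_of_pos (a + 3) b (by norm_num)]
  have hN : (if a < b then ((b - a + 3 - 1) / 3).toNat else 0) =
      (if a + 3 < b then ((b - (a + 3) + 3 - 1) / 3).toNat else 0) + 1 := by
    by_cases h2 : a + 3 < b <;> simp [h, h2] <;> omega
  rw [hN, List.range_succ_eq_map, List.map_cons, List.map_map]
  refine List.cons_eq_cons.mpr ⟨by simp, ?_⟩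
  apply List.map_congr_left
  intro k _
  simp only [Function.comp_apply, Nat.succ_eq_add_one]
  push_cast
  ring

-- the step-3 range from the first multiple of 3 ≥ low is exactly pvMults
theorem range_eq_mults (low e : Int) :
    PySem.List.pyRange (low + (-low) % 3) (e + 1) 3 = pvMults low e := by
  by_cases h : low ≤ e
  · by_cases hz : low % 3 = 0
    · have hm : (-low) % 3 = 0 := by omega
      rw [hm, add_zero, range3_cons low (e + 1) (by omega)]
      have hs : low + 3 = (low + 1) + (-(low + 1)) % 3 := by omega
      rw [hs, range_eq_mults (low + 1) e]
      conv_rhs => rw [pvMults]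
      simp [h, hz]
    · have hs : low + (-low) % 3 = (low + 1) + (-(low + 1)) % 3 := by omega
      rw [hs, range_eq_mults (low + 1) e]
      conv_rhs => rw [pvMults]
      simp [h, hz]
  · have h1 : pvMults low e = [] := by rw [pvMults]; simp [h]
    have h2 : ¬ (low + (-low) % 3 < e + 1) := by omega
    rw [h1, PySem.List.pyRange_of_pos _ _ (by norm_num : (0:Int) < 3)]
    simp [h2]
termination_by (e + 1 - low).toNat
decreasing_by all_goals omega

-- result[0:len(result)-1] is dropLast
theorem slice_pred (xs : List Char) :
    PySem.List.slice xs none (some ((xs.length : Int) - 1)) = xs.dropLast := by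
  match xs with
  | [] => simpa using PySem.List.slice_to_neg_one ([] : List Char)
  | c :: t =>
    rw [PySem.List.slice_to _ (by simp)]
    rw [List.dropLast_eq_take]
    congr 1
    omega

-- ===== VERDICT (by name: the statement is the Claim_ definition above) =====
theorem count_flex_spec : Claim_equal_count_flex := by
  intro low high mult _hdom
  unfold Spec_count_flex count_flex count_flex_alt
  apply String.toList_inj.mp
  rw [PySem.Str.toList_slice, PySem.Str.toList_join]
  have hstart : -(PySem.Int.floordiv (-low) 3) * 3 = low + (-low) % 3 := by
    rw [PySem.Int.floordiv_eq_ediv_of_pos (by norm_num)]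
    omega
  rw [hstart, range_eq_mults low high]
  have hlen : PySem.Str.len (countLoopA low high "") =
      ((countLoopA low high "").toList.length : Int) := PySem.Str.len_eq _
  rw [hlen]
  show PySem.Chars.slice _ _ _ = _
  unfold PySem.Chars.slice
  rw [PySem.List.slice_zero_start, slice_pred, loopA_eq]
  have hacc : ("" : String).toList = [] := rfl
  rw [hacc, List.nil_append, join_trim]
  have hsep : (",".toList : List Char) = [','] := rfl
  rw [hsep, List.map_map]
  congr 1
  apply List.map_congr_left
  intro n _
  simp [PySem.Int.toList_toStr]
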